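-- pv_equiv track=rewrite | github.com/huminhi/Coupon | couponapp/common/v2/utils/arrays.py | replace_array
-- ===== SOURCE A (Python) =====
-- def replace_array(from_array, replace_array_values):
--     temp_array = list(from_array)
--     arr = [val for val in from_array]
--     for item in replace_array_values:
--         try:
--             i = temp_array.index(item[0])
--             temp_array[i] = '___'
--             arr[i] = item[1]
--         except:
--             pass
--
--     return arr
-- ===== SOURCE B (Python) =====
-- def replace_array(from_array, replace_array_values):
--     # Group replacement values per key (key -> queue of values), then make ONE
--     # left-to-right pass over from_array: the j-th occurrence of value x takes
--     # the j-th queued value for x, if any.  Different keys touch disjoint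
--     # positions, so this pass reproduces A's pair-by-pair replacement exactly.
--     vals = {}
--     for k, v in replace_array_values:
--         vals.setdefault(k, []).append(v)
--     seen = {}
--     out = []
--     for x in from_array:
--         c = seen.get(x, 0)
--         vs = vals.get(x)
--         if vs is not None and c < len(vs):
--             out.append(vs[c])
--         else:
--             out.append(x)
--         seen[x] = c + 1
--     return out
-- ===== Notes on version B (the rewrite author's own statement) =====
-- stated objective: faster
-- what changed: B groups the replacement pairs into per-key value queues and then makes a single left-to-right pass over from_array (the j-th occurrence of a value takes its j-th queued replacement), instead of A's per-pair list.index scans over a sentinel-mutated copy.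
import Mathlib
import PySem

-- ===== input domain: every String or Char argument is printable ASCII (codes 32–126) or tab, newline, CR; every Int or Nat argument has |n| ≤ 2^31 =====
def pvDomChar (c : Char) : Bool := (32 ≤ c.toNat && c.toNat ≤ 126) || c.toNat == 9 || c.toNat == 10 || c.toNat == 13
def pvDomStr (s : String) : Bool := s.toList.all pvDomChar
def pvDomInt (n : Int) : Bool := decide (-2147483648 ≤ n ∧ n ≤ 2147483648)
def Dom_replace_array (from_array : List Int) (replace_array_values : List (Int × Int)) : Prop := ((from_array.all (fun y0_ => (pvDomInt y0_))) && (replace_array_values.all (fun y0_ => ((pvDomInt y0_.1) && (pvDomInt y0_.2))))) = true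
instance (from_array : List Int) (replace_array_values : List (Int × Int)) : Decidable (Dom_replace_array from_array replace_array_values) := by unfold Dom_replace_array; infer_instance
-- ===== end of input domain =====

-- B groups the replacement values per key and then makes ONE left-to-right pass over
-- from_array (the j-th occurrence of x takes the j-th queued value for x), instead of
-- A's per-pair list.index scans over a sentinel-mutated copy; objective: faster.

-- ===== PORT A =====
-- temp_array holds ints with the string sentinel '___' overwriting used slots; modelled
-- as List (Option Int), none = '___' (the sentinel never compares equal to an int, so
-- this is exact).  temp_array.index(k) = first index equal to some k; ValueError from
-- .index caught by the bare except = the none branch.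
def replaceA_loop (pairs : List (Int × Int)) (temp : List (Option Int)) (arr : List Int) : List Int :=
  match pairs with
  | [] => arr
  | (k, v) :: rest =>
    match List.findIdx? (fun x => x == some k) temp with
    | none => replaceA_loop rest temp arr
    | some i => replaceA_loop rest (temp.set i none) (arr.set i v)

def replace_array (from_array : List Int) (replace_array_values : List (Int × Int)) : List Int :=
  replaceA_loop replace_array_values (from_array.map some) from_array

-- ===== PORT B =====
-- vals.setdefault(k, []).append(v) over the pairs (a dict key -> queue of values)
def buildVals (pairs : List (Int × Int)) : PySem.Dict Int (List Int) :=
  pairs.foldl (fun d p => d.modify p.1 [] (· ++ [p.2])) PySem.Dict.empty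

-- the single pass over from_array: c = seen.get(x, 0); emit vals[x][c] if it exists
def bLoop (xs : List Int) (vals : PySem.Dict Int (List Int)) (seen : PySem.Dict Int Nat) : List Int :=
  match xs with
  | [] => []
  | x :: rest =>
    let c := seen.getD x 0
    let y :=
      match vals.get? x with
      | none => x
      | some vs => if h : c < vs.length then vs[c] else x
    y :: bLoop rest vals (seen.insert x (c + 1))

def replace_array_alt (from_array : List Int) (replace_array_values : List (Int × Int)) : List Int :=
  bLoop from_array (buildVals replace_array_values) PySem.Dict.empty

-- ===== PRECONDITION & SPEC =====
def Spec_replace_array (from_array : List Int) (replace_array_values : List (Int × Int)) (out : List Int) : Prop := out = replace_array_alt from_array replace_array_values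
instance (from_array : List Int) (replace_array_values : List (Int × Int)) (out : List Int) : Decidable (Spec_replace_array from_array replace_array_values out) := by unfold Spec_replace_array; infer_instance

-- ===== CLAIM (what is proved, stated in full; the proofs are below) =====
def Claim_equal_replace_array : Prop := ∀ (from_array : List Int) (replace_array_values : List (Int × Int)), Dom_replace_array from_array replace_array_values → Spec_replace_array from_array replace_array_values (replace_array from_array replace_array_values)

-- ===== LEMMAS AND PROOFS =====

-- the queue of replacement values destined for key k, in pair order
def valsFor (pairs : List (Int × Int)) (k : Int) : List Int :=
  (pairs.filter (fun p => p.1 == k)).map Prod.snd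

theorem valsFor_cons (k v k' : Int) (rest : List (Int × Int)) :
    valsFor ((k, v) :: rest) k' = if k = k' then v :: valsFor rest k' else valsFor rest k' := by
  by_cases h : k = k' <;> simp [valsFor, h]

theorem buildVals_getD (pairs : List (Int × Int)) (k : Int) :
    (buildVals pairs).getD k [] = valsFor pairs k := by
  unfold buildVals valsFor
  rw [PySem.Dict.getD_foldl_modify_append]
  simp

theorem replaceA_loop_length (pairs : List (Int × Int)) (temp : List (Option Int)) (arr : List Int) :
    (replaceA_loop pairs temp arr).length = arr.length := by
  induction pairs generalizing temp arr with
  | nil => rfl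
  | cons p rest ih =>
    obtain ⟨k, v⟩ := p
    simp only [replaceA_loop]
    cases List.findIdx? (fun x => x == some k) temp with
    | none => exact ih temp arr
    | some i => rw [ih]; simp

theorem bLoop_length (xs : List Int) (vals : PySem.Dict Int (List Int)) (seen : PySem.Dict Int Nat) :
    (bLoop xs vals seen).length = xs.length := by
  induction xs generalizing seen with
  | nil => rfl
  | cons x rest ih => simp [bLoop, ih]

-- A's loop, characterised pointwise: position i gets the (count-so-far)-th value for its key
theorem replaceA_loop_getElem (pairs : List (Int × Int)) (temp : List (Option Int)) (arr : List Int)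
    (hlen : temp.length = arr.length) (i : Nat) (h : i < arr.length)
    (h' : i < (replaceA_loop pairs temp arr).length)
    (ht : i < temp.length) :
    (replaceA_loop pairs temp arr)[i] =
      match temp[i] with
      | none => arr[i]
      | some k => (valsFor pairs k).getD ((temp.take i).count (some k)) arr[i] := by
  induction pairs generalizing temp arr with
  | nil =>
    cases htmp : temp[i] with
    | none => simp [replaceA_loop]
    | some k => simp [replaceA_loop, valsFor]
  | cons p rest ih =>
    obtain ⟨k, v⟩ := p
    cases hfind : List.findIdx? (fun x => x == some k) temp with
    | none =>
      have hred : replaceA_loop ((k, v) :: rest) temp arr = replaceA_loop rest temp arr := by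
        simp [replaceA_loop, hfind]
      simp only [hred]
      have hnone : ∀ j (hj : j < temp.length), ¬ (temp[j] == some k) = true := by
        intro j hj
        simpa using List.findIdx?_eq_none_iff.mp hfind _ (List.getElem_mem hj)
      rw [ih temp arr hlen h (by rwa [replaceA_loop_length]) ht]
      cases htmp : temp[i] with
      | none => simp
      | some k' =>
        have hk' : k' ≠ k := by
          intro hkk; subst hkk
          exact hnone i ht (by simp [htmp])
        simp only [valsFor_cons, if_neg (Ne.symm hk')]
    | some j =>
      have hred : replaceA_loop ((k, v) :: rest) temp arr
          = replaceA_loop rest (temp.set j none) (arr.set j v) := by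
        simp [replaceA_loop, hfind]
      simp only [hred]
      obtain ⟨hj, hpj, hfirst⟩ := List.findIdx?_eq_some_iff_getElem.mp hfind
      have htj : temp[j] = some k := by simpa using hpj
      have hlen' : (temp.set j none).length = (arr.set j v).length := by simp [hlen]
      have ht' : i < (temp.set j none).length := by simpa using ht
      rw [ih (temp.set j none) (arr.set j v) hlen' (by simpa using h) (by rw [replaceA_loop_length]; simpa using h) ht']
      by_cases hij : i = j
      · subst hij
        have h1 : (temp.set i none)[i] = none := by simp
        simp only [h1, htj]
        have hc : ((temp.take i).count (some k)) = 0 := by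
          rw [List.count_eq_zero]
          intro hmem
          obtain ⟨m, hm, hme⟩ := List.getElem_of_mem hmem
          have hmi : m < i := by
            have := hm; simp only [List.length_take] at this; omega
          have htm : temp[m]'(by omega) = some k := by
            simpa [List.getElem_take] using hme
          exact hfirst m hmi (by simp [htm])
        rw [hc, valsFor_cons, if_pos rfl]
        simp
      · have h1 : (temp.set j none)[i] = temp[i] := List.getElem_set_ne (Ne.symm hij) _
        have h2 : (arr.set j v)[i]'(by simpa using h) = arr[i] := List.getElem_set_ne (Ne.symm hij) _
        rw [h1, h2]
        cases htmp : temp[i] with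
        | none => simp
        | some k' =>
          simp only
          by_cases hjlt : j < i
          · -- position j lies inside the counted prefix
            have hjlen : j < (temp.take i).length := by simp; omega
            have hjget : (temp.take i)[j] = some k := by
              rw [List.getElem_take]; exact htj
            have hcset : ((temp.set j none).take i).count (some k')
                = (temp.take i).count (some k')
                  - (if ((some k : Option Int) == some k') = true then 1 else 0) := by
              rw [List.take_set, List.count_set hjlen, hjget]
              simp
            by_cases hkk : k' = k
            · subst hkk
              -- the prefix count drops by one; the head value v is consumed
              have hpos : 0 < (temp.take i).count (some k') := by
                refine List.count_pos_iff.mpr ?_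
                rw [← hjget]; exact List.getElem_mem hjlen
              rw [hcset, valsFor_cons, if_pos rfl]
              simp only [BEq.rfl, if_pos]
              cases hcc : (temp.take i).count (some k') with
              | zero => omega
              | succ m => simp
            · have : ((some k : Option Int) == some k') = false := by
                simp; exact fun hh => hkk hh.symm
              rw [hcset, this, valsFor_cons, if_neg (Ne.symm hkk)]
              simp
          · -- j outside the prefix: take i unchanged
            have htake : (temp.set j none).take i = temp.take i := by
              rw [List.take_set, List.set_eq_of_length_le]
              simp; omega
            rw [htake]
            by_cases hkk : k' = k
            · subst hkk
              exact absurd (hfirst i (by omega) (by simp [htmp])) (by simp)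
            · rw [valsFor_cons, if_neg (Ne.symm hkk)]

-- B's pass, characterised pointwise, with the seen-dict tracked by an abstract count f
theorem bLoop_getElem (xs : List Int) (vals : PySem.Dict Int (List Int))
    (seen : PySem.Dict Int Nat) (f : Int → Nat) (hseen : ∀ x, seen.getD x 0 = f x)
    (i : Nat) (h : i < xs.length)
    (h' : i < (bLoop xs vals seen).length) :
    (bLoop xs vals seen)[i]
      = (vals.getD xs[i] []).getD (f xs[i] + (xs.take i).count xs[i]) xs[i] := by
  induction xs generalizing seen f i with
  | nil => simp at h
  | cons x rest ih =>
    cases i with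
    | zero =>
      simp only [bLoop, List.getElem_cons_zero, List.take_zero, List.count_nil, Nat.add_zero, hseen x]
      cases hget : vals.get? x with
      | none =>
        rw [PySem.Dict.getD_of_get?_eq_none _ _ hget]
        simp
      | some vs =>
        rw [PySem.Dict.getD_of_get?_eq_some _ _ hget]
        by_cases hlt : f x < vs.length
        · simp [hlt]
        · simp [hlt]
    | succ n =>
      have hn : n < rest.length := by simpa using h
      simp only [bLoop, List.getElem_cons_succ]
      rw [ih (seen.insert x (seen.getD x 0 + 1))
        (fun y => if y = x then f x + 1 else f y) ?_ n hn (by rwa [bLoop_length])]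
      · simp only [List.take_succ_cons, List.count_cons]
        by_cases hx : rest[n] = x
        · simp [hx, Nat.add_comm, Nat.add_left_comm]
        · simp [hx, Ne.symm hx]
      · intro y
        by_cases hy : y = x
        · subst hy; simp [PySem.Dict.getD_insert_self, hseen]
        · simp [PySem.Dict.getD_insert_of_ne _ _ _ hy, hseen, hy]

-- ===== VERDICT (by name: the statement is the Claim_ definition above) =====
theorem replace_array_spec : Claim_equal_replace_array := by
  intro xs pairs _
  unfold Spec_replace_array replace_array replace_array_alt
  apply List.ext_getElem
  · rw [replaceA_loop_length, bLoop_length]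
  intro i hA hB
  have hx : i < xs.length := by rwa [replaceA_loop_length] at hA
  rw [replaceA_loop_getElem pairs (xs.map some) xs (by simp) i hx hA (by simpa using hx),
    bLoop_getElem xs (buildVals pairs) PySem.Dict.empty (fun _ => 0)
      (fun x => PySem.Dict.getD_empty x 0) i (by rwa [bLoop_length] at hB) hB]
  have hmap : (xs.map some)[i]'(by simpa using hx) = some xs[i] := by simp
  rw [hmap]
  simp only [buildVals_getD, Nat.zero_add]
  congr 1
  rw [← List.map_take, List.count_map_of_injective _ some (fun a b => Option.some.inj)]
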